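-- pv_equiv track=rewrite | github.com/SainanLuo/multiMotif | tests/Bacillus/VariaMotif_timer.py | generate_motif_variants
-- ===== SOURCE A (Python) =====
-- from itertools import product
--
-- def generate_motif_variants(motif):
--     variants = []
--     ambiguous_bases = {
--         'W': 'AT',
--         'S': 'GC',
--         'M': 'AC',
--         'K': 'GT',
--         'R': 'AG',
--         'Y': 'CT',
--         'B': 'CGT',
--         'D': 'AGT',
--         'H': 'ACT',
--         'V': 'ACG',
--         'N': 'ACGT'
--     }
--     variant_bases = []
--     motif_variants = []
--
--     for base in motif:
--         if base in ambiguous_bases: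
--             variant_bases.append(list(ambiguous_bases[base]))
--         else:
--             variant_bases.append([base])
--
--     motif_variants = product(*variant_bases)
--
--     for variant in motif_variants:
--         variants.append(''.join(variant))
--
--     return variants
-- ===== SOURCE B (Python) =====
-- def generate_motif_variants(motif):
--     ambiguous_bases = {
--         'W': 'AT', 'S': 'GC', 'M': 'AC', 'K': 'GT', 'R': 'AG', 'Y': 'CT',
--         'B': 'CGT', 'D': 'AGT', 'H': 'ACT', 'V': 'ACG', 'N': 'ACGT'
--     }
--     options = [ambiguous_bases.get(base, base) for base in motif]
--     total = 1
--     for opts in options: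
--         total *= len(opts)
--     variants = []
--     for i in range(total):
--         rem = i
--         chars = []
--         for opts in reversed(options):
--             rem, d = divmod(rem, len(opts))
--             chars.append(opts[d])
--         variants.append(''.join(reversed(chars)))
--     return variants
-- ===== Notes on version B (the rewrite author's own statement) =====
-- stated objective: alternative
-- what changed: Instead of materializing per-position option lists and taking their Cartesian product, B counts the total number of variants and decodes each index 0..total-1 as a mixed-radix numeral (one digit per position, last position least significant) to build each variant directly.
import Mathlib
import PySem

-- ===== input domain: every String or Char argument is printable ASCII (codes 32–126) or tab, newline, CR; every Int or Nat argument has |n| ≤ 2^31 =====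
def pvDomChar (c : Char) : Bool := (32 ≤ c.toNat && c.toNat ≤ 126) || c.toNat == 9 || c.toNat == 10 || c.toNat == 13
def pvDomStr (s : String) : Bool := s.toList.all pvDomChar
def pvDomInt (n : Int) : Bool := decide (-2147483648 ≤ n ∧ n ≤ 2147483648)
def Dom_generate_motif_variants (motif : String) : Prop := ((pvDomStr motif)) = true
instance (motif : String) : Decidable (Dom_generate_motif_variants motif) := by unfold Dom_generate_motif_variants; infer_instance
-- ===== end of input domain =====

-- B enumerates variants by index: it computes the total count and decodes each index 0..total-1 in mixed radix
-- (one digit per position, last position least significant) instead of building the Cartesian product; objective: alternative.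

-- shared table: the ambiguous_bases dict literal both Pythons define
def pvAmbiguous : PySem.Dict Char String :=
  PySem.Dict.ofList [('W', "AT"), ('S', "GC"), ('M', "AC"), ('K', "GT"), ('R', "AG"),
                     ('Y', "CT"), ('B', "CGT"), ('D', "AGT"), ('H', "ACT"), ('V', "ACG"), ('N', "ACGT")]

-- ===== PORT A =====
-- per-base option list: 'if base in ambiguous_bases: list(ambiguous_bases[base]) else [base]'
def pvOptListA (base : Char) : List Char :=
  if PySem.Dict.contains pvAmbiguous base then
    (PySem.Dict.getD pvAmbiguous base "").toList
  else [base]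

-- itertools.product(*variant_bases): leftmost varies slowest
def pvProduct : List (List Char) → List (List Char)
  | [] => [[]]
  | l :: ls => l.flatMap (fun x => (pvProduct ls).map (fun v => x :: v))

def generate_motif_variants (motif : String) : List String :=
  let variant_bases := motif.toList.map pvOptListA
  (pvProduct variant_bases).map (fun variant => String.ofList variant)

-- ===== PORT B =====
-- options[j] = ambiguous_bases.get(base, base)
def pvOptsB (base : Char) : String := PySem.Dict.getD pvAmbiguous base (String.singleton base)

-- one step of the inner 'for opts in reversed(options): rem, d = divmod(rem, len(opts)); chars.append(opts[d])'.
-- len(opts) ≥ 1 always, so divmod never raises (floordiv/mod are exact for a positive divisor) and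
-- d = rem % len(opts) is always in range: the '.getD' default of pyGet? is unreachable (a totalization guard only).
def pvDecodeStep (st : Int × List Char) (opts : String) : Int × List Char :=
  let rem := PySem.Int.floordiv st.1 (PySem.Str.len opts)
  let d := PySem.Int.mod st.1 (PySem.Str.len opts)
  (rem, st.2 ++ [(PySem.Str.pyGet? opts d).getD 'A'])

def generate_motif_variants_alt (motif : String) : List String :=
  let options := motif.toList.map pvOptsB
  let total := options.foldl (fun t opts => t * PySem.Str.len opts) 1
  (PySem.List.pyRange 0 total 1).map (fun i =>
    String.ofList ((options.reverse.foldl pvDecodeStep (i, [])).2.reverse))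

-- ===== PRECONDITION & SPEC =====
def Spec_generate_motif_variants (motif : String) (out : List String) : Prop := out = generate_motif_variants_alt motif
instance (motif : String) (out : List String) : Decidable (Spec_generate_motif_variants motif out) := by unfold Spec_generate_motif_variants; infer_instance

-- ===== CLAIM (what is proved, stated in full; the proofs are below) =====
def Claim_equal_generate_motif_variants : Prop := ∀ (motif : String), Dom_generate_motif_variants motif → Spec_generate_motif_variants motif (generate_motif_variants motif)

-- ===== LEMMAS AND PROOFS =====

lemma pvAmbiguous_mk : pvAmbiguous = PySem.Dict.mk
    [('W', "AT"), ('S', "GC"), ('M', "AC"), ('K', "GT"), ('R', "AG"),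
     ('Y', "CT"), ('B', "CGT"), ('D', "AGT"), ('H', "ACT"), ('V', "ACG"), ('N', "ACGT")] := by decide

-- B's per-base option string has the same characters as A's option list
lemma pvOpt_eq (base : Char) : (pvOptsB base).toList = pvOptListA base := by
  unfold pvOptsB pvOptListA
  by_cases h : PySem.Dict.contains pvAmbiguous base = true
  · rw [pvAmbiguous_mk, PySem.Dict.contains_mk] at h
    simp at h
    rcases h with rfl | rfl | rfl | rfl | rfl | rfl | rfl | rfl | rfl | rfl | rfl <;> decide
  · simp only [h, if_false, Bool.false_eq_true]
    rw [PySem.Dict.getD_of_not_contains _ _ (by simpa using h)]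
    simp

lemma pvOpt_ne_nil (base : Char) : (pvOptsB base).toList ≠ [] := by
  by_cases h : PySem.Dict.contains pvAmbiguous base = true
  · unfold pvOptsB
    rw [pvAmbiguous_mk, PySem.Dict.contains_mk] at h
    simp at h
    rcases h with rfl | rfl | rfl | rfl | rfl | rfl | rfl | rfl | rfl | rfl | rfl <;> decide
  · unfold pvOptsB
    rw [PySem.Dict.getD_of_not_contains _ _ (by simpa using h)]
    simp

-- the product of the option lengths (Nat)
def pvN (rs : List String) : Nat := (rs.map (fun s => s.toList.length)).prod

lemma pv_total_eq (l : List String) (t : Int) :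
    l.foldl (fun t opts => t * PySem.Str.len opts) t = t * (pvN l : Int) := by
  induction l generalizing t with
  | nil => simp [pvN]
  | cons s rest ih =>
    rw [List.foldl_cons, PySem.Str.len_eq, ih]
    simp only [pvN, List.map_cons, List.prod_cons]
    push_cast
    ring

-- the accumulator of the decode fold only grows: split it off
lemma pv_fold_snd (l : List String) : ∀ (i : Int) (acc : List Char),
    (l.foldl pvDecodeStep (i, acc)).2 = acc ++ (l.foldl pvDecodeStep (i, [])).2 := by
  induction l with
  | nil => intro i acc; simp
  | cons s rest ih =>
    intro i acc
    rw [List.foldl_cons, List.foldl_cons]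
    show (rest.foldl pvDecodeStep (PySem.Int.floordiv i (PySem.Str.len s),
            acc ++ [(PySem.Str.pyGet? s (PySem.Int.mod i (PySem.Str.len s))).getD 'A'])).2
      = acc ++ (rest.foldl pvDecodeStep (PySem.Int.floordiv i (PySem.Str.len s),
            [] ++ [(PySem.Str.pyGet? s (PySem.Int.mod i (PySem.Str.len s))).getD 'A'])).2
    conv_lhs => rw [ih]
    conv_rhs => rw [ih]
    simp

lemma pv_map_range_getD {α β : Type} (l : List α) (f : α → β) (d : α) :
    (List.range l.length).map (fun r => f (l.getD r d)) = l.map f := by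
  induction l with
  | nil => simp
  | cons x xs ih =>
    rw [List.length_cons, List.range_succ_eq_map, List.map_cons, List.map_map, List.map_cons]
    rw [List.getD_cons_zero]
    congr 1

lemma pv_range_mul {α : Type} (M k : Nat) (f : Nat → α) :
    (List.range (M * k)).map f
      = (List.range M).flatMap (fun q => (List.range k).map (fun r => f (q * k + r))) := by
  induction M with
  | zero => simp
  | succ M ih =>
    rw [Nat.succ_mul, List.range_add, List.range_succ]
    simp [ih, List.map_map, Function.comp]

lemma pvProduct_append (ls : List (List Char)) (l : List Char) :
    pvProduct (ls ++ [l]) = (pvProduct ls).flatMap (fun v => l.map (fun x => v ++ [x])) := by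
  induction ls with
  | nil =>
    have hl : ∀ cs : List Char, cs.flatMap (fun x => [[x]]) = cs.map (fun x => [x]) := by
      intro cs
      induction cs with
      | nil => rfl
      | cons c cs ihc => simp [ihc]
    simp [pvProduct, hl]
  | cons a as ih =>
    simp only [List.cons_append, pvProduct, ih, List.map_flatMap, List.flatMap_assoc]
    congr 1; funext x
    simp [List.flatMap_map, List.map_map, Function.comp_def]

-- decoding all indices 0..∏len-1 (over the REVERSED option list, as B's inner loop runs) enumerates the product
lemma pv_decode_main (rs : List String) (h : ∀ s ∈ rs, s.toList ≠ []) :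
    (List.range (pvN rs)).map (fun (n : Nat) => (rs.foldl pvDecodeStep (((n : Nat) : Int), [])).2.reverse)
      = pvProduct (rs.reverse.map String.toList) := by
  induction rs with
  | nil => simp [pvN, pvProduct]
  | cons s rest ih =>
    have hk : 0 < s.toList.length := List.length_pos_iff.mpr (h s (by simp))
    have hrest : ∀ t ∈ rest, t.toList ≠ [] := fun t ht => h t (by simp [ht])
    have hN : pvN (s :: rest) = pvN rest * s.toList.length := by
      simp [pvN, Nat.mul_comm]
    rw [hN, pv_range_mul]
    rw [List.reverse_cons, List.map_append, List.map_cons, List.map_nil, pvProduct_append, ← ih hrest]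
    rw [List.flatMap_map]
    apply List.flatMap_congr
    intro q hq
    rw [List.mem_range] at hq
    -- inner: each r < len(s) picks character s.toList[r] and leaves quotient q
    rw [← pv_map_range_getD s.toList (fun x => (rest.foldl pvDecodeStep ((q:Int), [])).2.reverse ++ [x]) 'A']
    apply List.map_congr_left
    intro r hr
    rw [List.mem_range] at hr
    have hdiv : (q * s.toList.length + r) / s.toList.length = q := by
      rw [Nat.mul_comm, Nat.mul_add_div hk, Nat.div_eq_of_lt hr, Nat.add_zero]
    have hmod : (q * s.toList.length + r) % s.toList.length = r := by
      rw [Nat.mul_comm, Nat.mul_add_mod_self_left, Nat.mod_eq_of_lt hr]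
    rw [List.foldl_cons]
    have hstep : pvDecodeStep (((q * s.toList.length + r : Nat) : Int), []) s
        = (PySem.Int.floordiv ((q * s.toList.length + r : Nat) : Int) (PySem.Str.len s),
           [] ++ [(PySem.Str.pyGet? s
              (PySem.Int.mod ((q * s.toList.length + r : Nat) : Int) (PySem.Str.len s))).getD 'A']) := rfl
    rw [hstep, pv_fold_snd]
    have e1 : PySem.Int.floordiv ((q * s.toList.length + r : Nat) : Int) (PySem.Str.len s)
        = ((q : Nat) : Int) := by
      rw [PySem.Str.len_eq, PySem.Int.floordiv_natCast, hdiv]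
    have e2 : PySem.Int.mod ((q * s.toList.length + r : Nat) : Int) (PySem.Str.len s)
        = ((r : Nat) : Int) := by
      rw [PySem.Str.len_eq, PySem.Int.mod_natCast, hmod]
    rw [e1, e2, PySem.Str.pyGet?_natCast]
    have hget : s.toList[r]? = some (s.toList.getD r 'A') := by
      simp [List.getD_eq_getElem?_getD, List.getElem?_eq_getElem hr]
    rw [hget]
    simp

-- ===== VERDICT (by name: the statement is the Claim_ definition above) =====
theorem generate_motif_variants_spec : Claim_equal_generate_motif_variants := by
  intro motif _
  unfold Spec_generate_motif_variants
  simp only [generate_motif_variants, generate_motif_variants_alt]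
  rw [pv_total_eq, one_mul, PySem.List.pyRange_one]
  simp only [List.map_map, Function.comp_def, Int.zero_add, Int.sub_zero, Int.toNat_natCast]
  have hne : ∀ s ∈ (motif.toList.map pvOptsB).reverse, s.toList ≠ [] := by
    intro s hs
    rw [List.mem_reverse, List.mem_map] at hs
    obtain ⟨b, _, rfl⟩ := hs
    exact pvOpt_ne_nil b
  have hNrev : pvN (motif.toList.map pvOptsB) = pvN ((motif.toList.map pvOptsB).reverse) := by
    simp [pvN, List.map_reverse]
  rw [hNrev]
  have hmain := congrArg (List.map String.ofList)
    (pv_decode_main ((motif.toList.map pvOptsB).reverse) hne)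
  rw [List.map_map] at hmain
  simp only [Function.comp_def] at hmain
  rw [hmain, List.reverse_reverse, List.map_map]
  simp only [Function.comp_def]
  have hopts : (fun x => (pvOptsB x).toList) = pvOptListA := funext pvOpt_eq
  rw [hopts]
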